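-- pv_equiv track=rewrite | github.com/megaheart/Planning-Optimization-group2-class143803 | Local_Search/local_search_file.py | TSP_best_neighbor
-- ===== SOURCE A (Python) =====
-- def calculate_M(x, N, e, l, C):
--     M = [0] * (N + 1)
--     for i in range(1, N + 1):
--         M[x[i]] = max(e[x[i]], M[x[i - 1]] + C[x[i - 1]][x[i]])
--         if M[x[i]] > l[x[i]]:
--             return M, False
--     return M, True
--
-- def calulate_cost(N, e, l, d, t_matrix, C, x):
--     M, is_valid = calculate_M(x, N, e, l, C)
--     if not is_valid:
--         return -1, False
--     return M[x[-1]] + C[x[-1]][0], True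
--
-- def TSP_generate_neighbor(N, x):
--     newX = x.copy()
--     for i in range(1, N):
--         for j in range(i + 1, N + 1):
--             tmp = newX[i]
--             newX[i] = newX[j]
--             newX[j] = tmp
--             yield newX
--             tmp = newX[i]
--             newX[i] = newX[j]
--             newX[j] = tmp
--
-- def TSP_best_neighbor(N, e, l, d, t_matrix, C, x, current_cost):
--     best_cost = current_cost
--     best_route = x
--     for newRoute in TSP_generate_neighbor(N, x):
--         # Check constraint and calculate cost
--         new_cost, is_valid = calulate_cost(N, e, l, d, t_matrix, C, newRoute)
--         # Update best cost and route
--         if is_valid and new_cost < best_cost: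
--             best_cost = new_cost
--             best_route = newRoute.copy()
--     return best_route, best_cost
-- ===== SOURCE B (Python) =====
-- def TSP_best_neighbor(N, e, l, d, t_matrix, C, x, current_cost):
--     best_cost = current_cost
--     best_pair = None
--     for i in range(1, N):
--         # shared prefix over positions 1..i-1 (identical in every (i, j)-swap neighbor),
--         # collapsed into a running scalar instead of a node-indexed array
--         t = 0
--         ok = True
--         for k in range(1, i):
--             t = max(e[x[k]], t + C[x[k - 1]][x[k]])
--             if t > l[x[k]]:
--                 ok = False
--                 break
--         if not ok:
--             continue
--         for j in range(i + 1, N + 1):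
--             # resume the recurrence from position i on the (i, j)-swapped route
--             acc = t
--             prev = x[i - 1]
--             valid = True
--             for k in range(i, N + 1):
--                 node = x[i] if k == j else (x[j] if k == i else x[k])
--                 acc = max(e[node], acc + C[prev][node])
--                 if acc > l[node]:
--                     valid = False
--                     break
--                 prev = node
--             if valid:
--                 cost = acc + C[prev][0]
--                 if cost < best_cost:
--                     best_cost = cost
--                     best_pair = (i, j)
--     if best_pair is None:
--         return x, best_cost
--     i, j = best_pair
--     best_route = x.copy()
--     best_route[i], best_route[j] = best_route[j], best_route[i]
--     return best_route, best_cost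
-- ===== Notes on version B (the rewrite author's own statement) =====
-- stated objective: faster
-- what changed: B replaces A's per-neighbor recomputation of the node-indexed M array with one validated running-scalar prefix per outer swap index i that is reused (resumed from position i) for every j, records only the best swap pair, and materialises the best route once at the end.
import Mathlib
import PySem

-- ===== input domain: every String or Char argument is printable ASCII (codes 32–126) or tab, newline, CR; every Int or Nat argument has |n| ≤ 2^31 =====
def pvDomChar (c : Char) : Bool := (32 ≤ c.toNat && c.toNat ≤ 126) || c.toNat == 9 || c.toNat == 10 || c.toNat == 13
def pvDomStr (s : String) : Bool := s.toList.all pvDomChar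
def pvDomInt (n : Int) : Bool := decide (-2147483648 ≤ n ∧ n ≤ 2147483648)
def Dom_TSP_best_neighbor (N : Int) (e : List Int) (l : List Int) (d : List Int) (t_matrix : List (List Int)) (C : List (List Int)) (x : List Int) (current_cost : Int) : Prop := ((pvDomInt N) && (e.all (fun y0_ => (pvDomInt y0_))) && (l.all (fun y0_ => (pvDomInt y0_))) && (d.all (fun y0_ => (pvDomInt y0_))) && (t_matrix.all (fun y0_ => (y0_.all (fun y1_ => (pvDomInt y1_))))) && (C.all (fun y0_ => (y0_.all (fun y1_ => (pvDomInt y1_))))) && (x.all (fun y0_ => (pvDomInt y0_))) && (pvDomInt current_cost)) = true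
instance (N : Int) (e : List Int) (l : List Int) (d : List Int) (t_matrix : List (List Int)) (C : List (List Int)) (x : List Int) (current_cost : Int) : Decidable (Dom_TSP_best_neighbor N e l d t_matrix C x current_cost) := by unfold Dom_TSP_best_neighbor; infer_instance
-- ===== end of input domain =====

-- B reuses one validated running-scalar prefix per outer swap index instead of recomputing
-- A's node-indexed M array for every neighbor, and builds the best route once at the end
-- (objective: faster — fewer recurrence steps, no per-neighbor allocation; equivalence is
-- about the return value; neither program mutates its arguments).

-- shared indexing helpers (Python list indexing / swap by two assignments)
def pvG (xs : List Int) (i : Int) : Int := PySem.List.pyGetD xs i 0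

def pvRow (C : List (List Int)) (i : Int) : List Int := PySem.List.pyGetD C i []

-- x with positions i and j exchanged (the tmp-swap of the Python sources)
def pvSwap (x : List Int) (i j : Int) : List Int :=
  PySem.List.pySetD (PySem.List.pySetD x i (pvG x j)) j (pvG x i)

-- ===== PORT A =====
-- the loop of calculate_M (early return on a violated deadline)
def pvCalcMGo (x e l : List Int) (C : List (List Int)) : List Int → List Int → List Int × Bool
  | [], M => (M, true)
  | i :: rest, M =>
      let xi := pvG x i
      let xp := pvG x (i - 1)
      let M' := PySem.List.pySetD M xi (max (pvG e xi) (pvG M xp + pvG (pvRow C xp) xi))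
      if pvG M' xi > pvG l xi then (M', false)
      else pvCalcMGo x e l C rest M'

def pvCalculateM (x : List Int) (N : Int) (e l : List Int) (C : List (List Int)) : List Int × Bool :=
  pvCalcMGo x e l C (PySem.List.pyRange 1 (N + 1) 1) (List.replicate (N + 1).toNat 0)

def pvCalculateCost (N : Int) (e l _d : List Int) (_t_matrix C : List (List Int)) (x : List Int) : Int × Bool :=
  let Mv := pvCalculateM x N e l C
  if !Mv.2 then (-1, false)
  else (pvG Mv.1 (pvG x (-1)) + pvG (pvRow C (pvG x (-1))) 0, true)

def TSP_best_neighbor (N : Int) (e : List Int) (l : List Int) (d : List Int) (t_matrix : List (List Int)) (C : List (List Int)) (x : List Int) (current_cost : Int) : List Int × Int :=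
  (PySem.List.pyRange 1 N 1).foldl (fun best i =>
    (PySem.List.pyRange (i + 1) (N + 1) 1).foldl (fun best j =>
      let newRoute := pvSwap x i j
      let cv := pvCalculateCost N e l d t_matrix C newRoute
      if cv.2 && decide (cv.1 < best.2) then (newRoute, cv.1) else best) best)
    (x, current_cost)

-- ===== PORT B =====
-- Source B's prefix loop: running scalar t over positions ks of route x (early break)
def pvPrefGo (x e l : List Int) (C : List (List Int)) : List Int → Int → Int × Bool
  | [], t => (t, true)
  | k :: ks, t =>
      let node := pvG x k
      let t' := max (pvG e node) (t + pvG (pvRow C (pvG x (k - 1))) node)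
      if t' > pvG l node then (t', false)
      else pvPrefGo x e l C ks t'

-- Source B's resume loop: positions ks of the (i,j)-swapped route, carrying acc and prev
def pvResGo (x e l : List Int) (C : List (List Int)) (i j : Int) : List Int → Int → Int → Int × Int × Bool
  | [], acc, prev => (acc, prev, true)
  | k :: ks, acc, prev =>
      let node := if k == j then pvG x i else if k == i then pvG x j else pvG x k
      let acc' := max (pvG e node) (acc + pvG (pvRow C prev) node)
      if acc' > pvG l node then (acc', prev, false)
      else pvResGo x e l C i j ks acc' node

def TSP_best_neighbor_alt (N : Int) (e : List Int) (l : List Int) (d : List Int) (t_matrix : List (List Int)) (C : List (List Int)) (x : List Int) (current_cost : Int) : List Int × Int :=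
  let s := (PySem.List.pyRange 1 N 1).foldl (fun (s : Int × Option (Int × Int)) i =>
    let pr := pvPrefGo x e l C (PySem.List.pyRange 1 i 1) 0
    if !pr.2 then s
    else (PySem.List.pyRange (i + 1) (N + 1) 1).foldl (fun s j =>
      let rv := pvResGo x e l C i j (PySem.List.pyRange i (N + 1) 1) pr.1 (pvG x (i - 1))
      if rv.2.2 then
        let cost := rv.1 + pvG (pvRow C rv.2.1) 0
        if cost < s.1 then (cost, some (i, j)) else s
      else s) s) (current_cost, none)
  match s.2 with
  | none => (x, s.1)
  | some (i, j) => (pvSwap x i j, s.1)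

-- ===== PRECONDITION & SPEC =====
-- Pre_ restricts to well-formed instances: for N ≥ 2 the route must list N+1 node ids in
-- 0..N and e, l, C (and every row of C) must cover nodes 0..N; for N ≤ 1 A inspects nothing.
-- Outside this, A raises IndexError except for accidental returns it reaches only through
-- Python's negative-index wraparound, surplus route entries beyond position N, or an early
-- invalid exit that skips the malformed entry (see cites).
def Pre_TSP_best_neighbor (N : Int) (e : List Int) (l : List Int) (d : List Int) (t_matrix : List (List Int)) (C : List (List Int)) (x : List Int) (current_cost : Int) : Prop :=
  N ≤ 1 ∨
  (2 ≤ N ∧ x.length = (N + 1).toNat ∧ (∀ v ∈ x, 0 ≤ v ∧ v ≤ N) ∧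
   (N + 1).toNat ≤ e.length ∧ (N + 1).toNat ≤ l.length ∧ (N + 1).toNat ≤ C.length ∧
   (∀ row ∈ C, (N + 1).toNat ≤ row.length))
instance (N : Int) (e : List Int) (l : List Int) (d : List Int) (t_matrix : List (List Int)) (C : List (List Int)) (x : List Int) (current_cost : Int) : Decidable (Pre_TSP_best_neighbor N e l d t_matrix C x current_cost) := by unfold Pre_TSP_best_neighbor; infer_instance

def pvWitness_TSP_best_neighbor : Int × List Int × List Int × List Int × List (List Int) × List (List Int) × List Int × Int :=
  (2, [0, 0, 0], [9, 9, 9], [0, 0, 0], [[0]], [[0, 1, 1], [1, 0, 1], [1, 1, 0]], [0, 1, 2], 5)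

def Spec_TSP_best_neighbor (N : Int) (e : List Int) (l : List Int) (d : List Int) (t_matrix : List (List Int)) (C : List (List Int)) (x : List Int) (current_cost : Int) (out : List Int × Int) : Prop := out = TSP_best_neighbor_alt N e l d t_matrix C x current_cost
instance (N : Int) (e : List Int) (l : List Int) (d : List Int) (t_matrix : List (List Int)) (C : List (List Int)) (x : List Int) (current_cost : Int) (out : List Int × Int) : Decidable (Spec_TSP_best_neighbor N e l d t_matrix C x current_cost out) := by unfold Spec_TSP_best_neighbor; infer_instance

-- ===== CLAIM (what is proved, stated in full; the proofs are below) =====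
def Claim_equal_TSP_best_neighbor : Prop := ∀ (N : Int) (e : List Int) (l : List Int) (d : List Int) (t_matrix : List (List Int)) (C : List (List Int)) (x : List Int) (current_cost : Int), Dom_TSP_best_neighbor N e l d t_matrix C x current_cost → Pre_TSP_best_neighbor N e l d t_matrix C x current_cost → Spec_TSP_best_neighbor N e l d t_matrix C x current_cost (TSP_best_neighbor N e l d t_matrix C x current_cost)

-- ===== LEMMAS AND PROOFS =====

theorem pvG_mem_or_zero (xs : List Int) (k : Int) : pvG xs k ∈ xs ∨ pvG xs k = 0 := by
  unfold pvG PySem.List.pyGetD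
  rcases h : PySem.List.pyGet? xs k with _ | v
  · right; rfl
  · left; simpa using PySem.List.mem_of_pyGet?_eq_some xs h

theorem pvG_set_self (xs : List Int) (a v : Int) (h0 : 0 ≤ a) (h1 : a < (xs.length : Int)) :
    pvG (PySem.List.pySetD xs a v) a = v := by
  rw [PySem.List.pySetD_of_nonneg _ _ h0]
  unfold pvG
  rw [PySem.List.pyGetD_of_nonneg _ _ h0]
  have h2 : a.toNat < xs.length := by omega
  rw [List.getD_eq_getElem?_getD, List.getElem?_set_self (by simpa using h2)]
  simp

theorem pvG_set_ne (xs : List Int) (a v k : Int) (h0 : 0 ≤ a) (hk : 0 ≤ k) (hne : k ≠ a) :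
    pvG (PySem.List.pySetD xs a v) k = pvG xs k := by
  rw [PySem.List.pySetD_of_nonneg _ _ h0]
  unfold pvG
  rw [PySem.List.pyGetD_of_nonneg _ _ hk, PySem.List.pyGetD_of_nonneg _ _ hk]
  rw [List.getD_eq_getElem?_getD, List.getD_eq_getElem?_getD,
      List.getElem?_set_ne (by omega)]

theorem pvG_replicate (n : Nat) (k : Int) : pvG (List.replicate n (0 : Int)) k = 0 := by
  rcases pvG_mem_or_zero (List.replicate n (0 : Int)) k with h | h
  · exact List.eq_of_mem_replicate h
  · exact h

theorem pvG_neg_one (xs : List Int) (N : Int) (hN : 0 ≤ N) (hl : (xs.length : Int) = N + 1) :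
    pvG xs (-1) = pvG xs N := by
  have hne : xs ≠ [] := by
    intro h; subst h; simp at hl; omega
  unfold pvG
  rw [PySem.List.pyGetD_neg_one _ _ hne, PySem.List.pyGetD_eq_getElem _ _ hN (by omega)]
  rw [List.getLast_eq_getElem]
  congr 1
  omega

theorem mem_pySetD (xs : List Int) (a w v : Int) (h : v ∈ PySem.List.pySetD xs a w) :
    v ∈ xs ∨ v = w := by
  unfold PySem.List.pySetD PySem.List.pySet? at h
  rcases hidx : PySem.List.pyIdx? xs.length a with _ | n
  · rw [hidx] at h; simp at h; exact Or.inl h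
  · rw [hidx] at h; simp at h
    rcases List.mem_or_eq_of_mem_set h with h' | h'
    · exact Or.inl h'
    · exact Or.inr h'

theorem pvG_swap (x : List Int) (i j k : Int) (h0i : 0 ≤ i) (h0j : 0 ≤ j)
    (hi : i < (x.length : Int)) (hj : j < (x.length : Int)) (hk : 0 ≤ k) (hij : i ≠ j) :
    pvG (pvSwap x i j) k = if k = j then pvG x i else if k = i then pvG x j else pvG x k := by
  unfold pvSwap
  by_cases hkj : k = j
  · subst hkj
    rw [pvG_set_self _ _ _ h0j (by rw [PySem.List.length_pySetD]; exact hj)]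
    simp
  · rw [pvG_set_ne _ _ _ _ h0j hk hkj]
    by_cases hki : k = i
    · subst hki
      rw [pvG_set_self _ _ _ h0i hi]
      simp [hkj]
    · rw [pvG_set_ne _ _ _ _ h0i hk hki]
      simp [hkj, hki]

theorem pvSwap_vals (x : List Int) (i j L : Int) (hL : 0 < L)
    (hx : ∀ v ∈ x, 0 ≤ v ∧ v < L) :
    ∀ k : Int, 0 ≤ pvG (pvSwap x i j) k ∧ pvG (pvSwap x i j) k < L := by
  have hg : ∀ m : Int, 0 ≤ pvG x m ∧ pvG x m < L := by
    intro m
    rcases pvG_mem_or_zero x m with h | h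
    · exact hx _ h
    · rw [h]; omega
  intro k
  rcases pvG_mem_or_zero (pvSwap x i j) k with h | h
  · rcases mem_pySetD _ _ _ _ (show pvG (pvSwap x i j) k ∈ _ from h) with h' | h'
    · rcases mem_pySetD _ _ _ _ h' with h'' | h''
      · exact hx _ h''
      · rw [h'']; exact hg j
    · rw [h']; exact hg i
  · rw [h]; omega

theorem calcMGo_eq_pref (e l : List Int) (C : List (List Int)) (r : List Int) (b : Int) :
    ∀ (n : Nat) (a : Int) (M : List Int) (t : Int),
      (b - a).toNat = n → 1 ≤ a → a ≤ b →
      (∀ k : Int, 0 ≤ pvG r k ∧ pvG r k < (M.length : Int)) →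
      pvG M (pvG r (a - 1)) = t →
      (pvCalcMGo r e l C (PySem.List.pyRange a b 1) M).2 = (pvPrefGo r e l C (PySem.List.pyRange a b 1) t).2 ∧
      ((pvPrefGo r e l C (PySem.List.pyRange a b 1) t).2 = true →
        pvG (pvCalcMGo r e l C (PySem.List.pyRange a b 1) M).1 (pvG r (b - 1)) =
          (pvPrefGo r e l C (PySem.List.pyRange a b 1) t).1) := by
  intro n
  induction n with
  | zero =>
      intro a M t hn h1 hab hv hMt
      have hba : b = a := by omega
      subst hba
      rw [PySem.List.pyRange_one_eq_nil (by omega)]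
      exact ⟨rfl, fun _ => hMt⟩
  | succ n ih =>
      intro a M t hn h1 hab hv hMt
      have hlt : a < b := by omega
      rw [PySem.List.pyRange_one_cons hlt]
      simp only [pvCalcMGo, pvPrefGo]
      have hnode := hv a
      set node := pvG r a with hnodedef
      have hself : pvG (PySem.List.pySetD M node (max (pvG e node) (pvG M (pvG r (a - 1)) + pvG (pvRow C (pvG r (a - 1))) node))) node
          = max (pvG e node) (pvG M (pvG r (a - 1)) + pvG (pvRow C (pvG r (a - 1))) node) :=
        pvG_set_self _ _ _ hnode.1 hnode.2
      rw [hself, hMt]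
      by_cases hbrk : max (pvG e node) (t + pvG (pvRow C (pvG r (a - 1))) node) > pvG l node
      · simp [hbrk]
      · simp only [hbrk, if_false]
        have hlen : ((PySem.List.pySetD M node (max (pvG e node) (t + pvG (pvRow C (pvG r (a - 1))) node))).length : Int) = (M.length : Int) := by
          rw [PySem.List.length_pySetD]
        refine ih (a + 1) _ _ (by omega) (by omega) (by omega) ?_ ?_
        · intro k; rw [hlen]; exact hv k
        · have : a + 1 - 1 = a := by ring
          rw [this, ← hnodedef]
          exact pvG_set_self _ _ _ hnode.1 hnode.2

theorem pvPrefGo_congr (e l : List Int) (C : List (List Int)) (r x : List Int) :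
    ∀ (ks : List Int) (t : Int),
      (∀ k ∈ ks, pvG r k = pvG x k ∧ pvG r (k - 1) = pvG x (k - 1)) →
      pvPrefGo r e l C ks t = pvPrefGo x e l C ks t := by
  intro ks
  induction ks with
  | nil => intro t _; rfl
  | cons k ks ih =>
      intro t h
      have hk := h k (by simp)
      simp only [pvPrefGo, hk.1, hk.2]
      split
      · rfl
      · exact ih _ (fun k' hk' => h k' (by simp [hk']))

theorem pvPrefGo_append (e l : List Int) (C : List (List Int)) (r : List Int) :
    ∀ (ks1 ks2 : List Int) (t : Int),
      pvPrefGo r e l C (ks1 ++ ks2) t =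
        (if (pvPrefGo r e l C ks1 t).2 then pvPrefGo r e l C ks2 (pvPrefGo r e l C ks1 t).1
         else pvPrefGo r e l C ks1 t) := by
  intro ks1
  induction ks1 with
  | nil => intro ks2 t; simp [pvPrefGo]
  | cons k ks ih =>
      intro ks2 t
      simp only [List.cons_append, pvPrefGo]
      split
      · simp
      · exact ih ks2 _

theorem resGo_eq_pref (e l : List Int) (C : List (List Int)) (x : List Int) (i j b : Int)
    (h0i : 0 ≤ i) (h0j : 0 ≤ j) (hi : i < (x.length : Int)) (hj : j < (x.length : Int))
    (hij : i ≠ j) :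
    ∀ (n : Nat) (a : Int) (acc prev : Int),
      (b - a).toNat = n → 1 ≤ a → a ≤ b →
      prev = pvG (pvSwap x i j) (a - 1) →
      (pvResGo x e l C i j (PySem.List.pyRange a b 1) acc prev).1 =
        (pvPrefGo (pvSwap x i j) e l C (PySem.List.pyRange a b 1) acc).1 ∧
      (pvResGo x e l C i j (PySem.List.pyRange a b 1) acc prev).2.2 =
        (pvPrefGo (pvSwap x i j) e l C (PySem.List.pyRange a b 1) acc).2 ∧
      ((pvPrefGo (pvSwap x i j) e l C (PySem.List.pyRange a b 1) acc).2 = true →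
        (pvResGo x e l C i j (PySem.List.pyRange a b 1) acc prev).2.1 = pvG (pvSwap x i j) (b - 1)) := by
  intro n
  induction n with
  | zero =>
      intro a acc prev hn h1 hab hprev
      have hba : b = a := by omega
      subst hba
      rw [PySem.List.pyRange_one_eq_nil (by omega)]
      exact ⟨rfl, rfl, fun _ => hprev⟩
  | succ n ih =>
      intro a acc prev hn h1 hab hprev
      have hlt : a < b := by omega
      rw [PySem.List.pyRange_one_cons hlt]
      simp only [pvResGo, pvPrefGo]
      have hnode : (if a == j then pvG x i else if a == i then pvG x j else pvG x a) = pvG (pvSwap x i j) a := by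
        rw [pvG_swap x i j a h0i h0j hi hj (by omega) hij]
        simp only [beq_iff_eq]
      rw [hnode, hprev]
      by_cases hbrk : max (pvG e (pvG (pvSwap x i j) a)) (acc + pvG (pvRow C (pvG (pvSwap x i j) (a - 1))) (pvG (pvSwap x i j) a)) > pvG l (pvG (pvSwap x i j) a)
      · simp [hbrk]
      · simp only [hbrk, if_false]
        exact ih (a + 1) _ _ (by omega) (by omega) (by omega) (by norm_num)

theorem length_pvSwap (x : List Int) (i j : Int) : (pvSwap x i j).length = x.length := by
  simp [pvSwap, PySem.List.length_pySetD]

theorem candidate_eq (N : Int) (e l d : List Int) (t_matrix C : List (List Int)) (x : List Int)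
    (i j : Int) (hN : 2 ≤ N) (hx : x.length = (N + 1).toNat)
    (hvals : ∀ v ∈ x, 0 ≤ v ∧ v ≤ N)
    (h1i : 1 ≤ i) (hij : i < j) (hjN : j ≤ N) :
    (pvCalculateCost N e l d t_matrix C (pvSwap x i j)).2 =
      ((pvPrefGo x e l C (PySem.List.pyRange 1 i 1) 0).2 &&
       (pvResGo x e l C i j (PySem.List.pyRange i (N + 1) 1)
          (pvPrefGo x e l C (PySem.List.pyRange 1 i 1) 0).1 (pvG x (i - 1))).2.2) ∧
    ((pvCalculateCost N e l d t_matrix C (pvSwap x i j)).2 = true →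
      (pvCalculateCost N e l d t_matrix C (pvSwap x i j)).1 =
        (pvResGo x e l C i j (PySem.List.pyRange i (N + 1) 1)
            (pvPrefGo x e l C (PySem.List.pyRange 1 i 1) 0).1 (pvG x (i - 1))).1 +
          pvG (pvRow C (pvResGo x e l C i j (PySem.List.pyRange i (N + 1) 1)
            (pvPrefGo x e l C (PySem.List.pyRange 1 i 1) 0).1 (pvG x (i - 1))).2.1) 0) := by
  have hxlen : (x.length : Int) = N + 1 := by omega
  set r := pvSwap x i j with hrdef
  have hrlen : (r.length : Int) = N + 1 := by rw [hrdef, length_pvSwap]; exact hxlen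
  have hvr : ∀ k : Int, 0 ≤ pvG r k ∧ pvG r k < N + 1 := by
    rw [hrdef]
    exact pvSwap_vals x i j (N + 1) (by omega) (fun v hv => ⟨(hvals v hv).1, by have := (hvals v hv).2; omega⟩)
  have hswapget := fun (k : Int) (hk : 0 ≤ k) =>
    pvG_swap x i j k (by omega) (by omega) (by omega) (by omega) hk (by omega)
  -- A's array computation as the scalar recurrence over r
  have hMlen : ((List.replicate (N + 1).toNat (0 : Int)).length : Int) = N + 1 := by
    simp; omega
  have hcalc := calcMGo_eq_pref e l C r (N + 1) (N.toNat) 1 (List.replicate (N + 1).toNat 0) 0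
      (by omega) (by omega) (by omega)
      (fun k => by rw [hMlen]; exact hvr k)
      (by rw [pvG_replicate])
  -- split the full scalar run at position i
  have hsplit := PySem.List.pyRange_one_append 1 i (N + 1) (by omega) (by omega)
  rw [hsplit, pvPrefGo_append] at hcalc
  -- the prefix over r equals the prefix over x
  have hpref : pvPrefGo r e l C (PySem.List.pyRange 1 i 1) 0 =
      pvPrefGo x e l C (PySem.List.pyRange 1 i 1) 0 := by
    apply pvPrefGo_congr
    intro k hk
    rw [PySem.List.mem_pyRange_one] at hk
    constructor
    · rw [hrdef, hswapget k (by omega)]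
      have : ¬ (k = j) := by omega
      have h2 : ¬ (k = i) := by omega
      simp [this, h2]
    · rw [hrdef, hswapget (k - 1) (by omega)]
      have : ¬ (k - 1 = j) := by omega
      have h2 : ¬ (k - 1 = i) := by omega
      simp [this, h2]
  rw [hpref] at hcalc
  set p := pvPrefGo x e l C (PySem.List.pyRange 1 i 1) 0 with hpdef
  -- B's resume loop equals the scalar run over r on the suffix
  have hres := resGo_eq_pref e l C x i j (N + 1) (by omega) (by omega) (by omega) (by omega)
      (by omega) (N + 1 - i).toNat i p.1 (pvG x (i - 1)) rfl (by omega) (by omega)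
      (by rw [hswapget (i - 1) (by omega)]
          have : ¬ (i - 1 = j) := by omega
          have h2 : ¬ (i - 1 = i) := by omega
          simp [this, h2])
  rw [← hrdef] at hres
  set rv := pvResGo x e l C i j (PySem.List.pyRange i (N + 1) 1) p.1 (pvG x (i - 1)) with hrvdef
  set S := pvPrefGo r e l C (PySem.List.pyRange i (N + 1) 1) p.1 with hSdef
  -- final read position: r[-1] is r[N]
  have hneg : pvG r (-1) = pvG r N := pvG_neg_one r N (by omega) hrlen
  -- unfold A's cost wrapper
  by_cases hp2 : p.2
  · simp only [hp2, if_true] at hcalc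
    constructor
    · simp only [pvCalculateCost, pvCalculateM]
      rw [hsplit, hcalc.1, hp2]
      cases hS2 : S.2
      · simp [hres.2.1, hS2]
      · simp [hres.2.1, hS2]
    · intro hv2
      simp only [pvCalculateCost, pvCalculateM] at hv2 ⊢
      rw [hsplit] at hv2 ⊢
      rw [hcalc.1] at hv2 ⊢
      cases hS2 : S.2
      · rw [hS2] at hv2; simp at hv2
      · simp only [Bool.not_true]
        have hfin := hcalc.2 (by rw [hS2])
        have hN1 : N + 1 - 1 = N := by ring
        rw [hN1] at hfin
        rw [hneg, hfin]
        have h1 : rv.1 = S.1 := hres.1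
        have h2 : rv.2.1 = pvG r N := by rw [hres.2.2 hS2, show N + 1 - 1 = N from by ring]
        simp [h1, h2]
  · have hp2' : p.2 = false := by simpa using hp2
    rw [hp2'] at hcalc
    simp only [Bool.false_eq_true, if_false] at hcalc
    constructor
    · simp only [pvCalculateCost, pvCalculateM]
      rw [hsplit, hcalc.1, hp2']
      simp
    · intro hv2
      exfalso
      simp only [pvCalculateCost, pvCalculateM] at hv2
      rw [hsplit, hcalc.1, hp2'] at hv2
      simp at hv2

theorem foldl_rel {α β γ : Type} (R : α → β → Prop) (f : α → γ → α) (g : β → γ → β) :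
    ∀ (lis : List γ) (a : α) (b : β), R a b →
      (∀ c ∈ lis, ∀ a b, R a b → R (f a c) (g b c)) →
      R (lis.foldl f a) (lis.foldl g b) := by
  intro lis
  induction lis with
  | nil => intro a b h _; exact h
  | cons c cs ih =>
      intro a b h hstep
      exact ih _ _ (hstep c (by simp) a b h) (fun c' hc' => hstep c' (by simp [hc']))

theorem foldl_id {α γ : Type} (f : α → γ → α) :
    ∀ (lis : List γ) (a : α), (∀ c ∈ lis, ∀ a, f a c = a) → lis.foldl f a = a := by
  intro lis
  induction lis with
  | nil => intro a _; rfl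
  | cons c cs ih =>
      intro a h
      simp only [List.foldl_cons, h c (by simp)]
      exact ih a (fun c' hc' => h c' (by simp [hc']))

theorem main_eq (N : Int) (e l d : List Int) (t_matrix C : List (List Int)) (x : List Int)
    (current_cost : Int)
    (hN : 2 ≤ N) (hxlen : x.length = (N + 1).toNat) (hvals : ∀ v ∈ x, 0 ≤ v ∧ v ≤ N) :
    TSP_best_neighbor N e l d t_matrix C x current_cost =
      TSP_best_neighbor_alt N e l d t_matrix C x current_cost := by
  -- relate the two fold states
  set mat : Option (Int × Int) → List Int := fun o => match o with
    | none => x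
    | some (i, j) => pvSwap x i j with hmat
  have key : (TSP_best_neighbor N e l d t_matrix C x current_cost).1 =
        mat ((PySem.List.pyRange 1 N 1).foldl (fun (s : Int × Option (Int × Int)) i =>
          let pr := pvPrefGo x e l C (PySem.List.pyRange 1 i 1) 0
          if !pr.2 then s
          else (PySem.List.pyRange (i + 1) (N + 1) 1).foldl (fun s j =>
            let rv := pvResGo x e l C i j (PySem.List.pyRange i (N + 1) 1) pr.1 (pvG x (i - 1))
            if rv.2.2 then
              let cost := rv.1 + pvG (pvRow C rv.2.1) 0
              if cost < s.1 then (cost, some (i, j)) else s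
            else s) s) (current_cost, none)).2 ∧
      (TSP_best_neighbor N e l d t_matrix C x current_cost).2 =
        ((PySem.List.pyRange 1 N 1).foldl (fun (s : Int × Option (Int × Int)) i =>
          let pr := pvPrefGo x e l C (PySem.List.pyRange 1 i 1) 0
          if !pr.2 then s
          else (PySem.List.pyRange (i + 1) (N + 1) 1).foldl (fun s j =>
            let rv := pvResGo x e l C i j (PySem.List.pyRange i (N + 1) 1) pr.1 (pvG x (i - 1))
            if rv.2.2 then
              let cost := rv.1 + pvG (pvRow C rv.2.1) 0
              if cost < s.1 then (cost, some (i, j)) else s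
            else s) s) (current_cost, none)).1 := by
    unfold TSP_best_neighbor
    apply foldl_rel (fun (a : List Int × Int) (b : Int × Option (Int × Int)) => a.1 = mat b.2 ∧ a.2 = b.1)
    · exact ⟨rfl, rfl⟩
    · intro i hi a b hR
      rw [PySem.List.mem_pyRange_one] at hi
      by_cases hpr : (pvPrefGo x e l C (PySem.List.pyRange 1 i 1) 0).2 = true
      · -- valid shared prefix: compare the two inner folds step by step
        simp only [hpr, Bool.not_true, Bool.false_eq_true, if_false]
        apply foldl_rel (fun (a : List Int × Int) (b : Int × Option (Int × Int)) => a.1 = mat b.2 ∧ a.2 = b.1)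
        · exact hR
        · intro j hj a' b' hR'
          rw [PySem.List.mem_pyRange_one] at hj
          have hcand := candidate_eq N e l d t_matrix C x i j hN hxlen hvals
            (by omega) (by omega) (by omega)
          rw [hpr] at hcand
          simp only [Bool.true_and] at hcand
          by_cases hrv : (pvResGo x e l C i j (PySem.List.pyRange i (N + 1) 1)
              (pvPrefGo x e l C (PySem.List.pyRange 1 i 1) 0).1 (pvG x (i - 1))).2.2 = true
          · have hc1 := hcand.2 (by rw [hcand.1, hrv])
            simp only [hrv, if_true]
            rw [hcand.1, hrv] at *
            by_cases hlt : (pvCalculateCost N e l d t_matrix C (pvSwap x i j)).1 < a'.2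
            · simp only [hc1, hR'.2] at hlt
              simp only [hlt, if_true]
              simp only [Bool.true_and, decide_eq_true_eq]
              rw [← hc1, ← hR'.2] at hlt
              simp only [hlt, if_true]
              exact ⟨rfl, hc1⟩
            · simp only [hc1, hR'.2] at hlt
              simp only [hlt, if_false]
              rw [← hc1, ← hR'.2] at hlt
              simp only [hlt, decide_false, Bool.and_false, Bool.false_eq_true, if_false]
              exact hR'
          · have hrv' : (pvResGo x e l C i j (PySem.List.pyRange i (N + 1) 1)
                (pvPrefGo x e l C (PySem.List.pyRange 1 i 1) 0).1 (pvG x (i - 1))).2.2 = false := by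
              simpa using hrv
            simp only [hrv', Bool.false_eq_true, if_false]
            rw [hcand.1, hrv'] at *
            simp only [Bool.false_and, Bool.false_eq_true, if_false]
            exact hR'
      · -- invalid shared prefix: A's inner loop never updates
        have hpr' : (pvPrefGo x e l C (PySem.List.pyRange 1 i 1) 0).2 = false := by simpa using hpr
        simp only [hpr', Bool.not_false, if_true]
        rw [foldl_id]
        · exact hR
        · intro j hj a'
          rw [PySem.List.mem_pyRange_one] at hj
          have hcand := candidate_eq N e l d t_matrix C x i j hN hxlen hvals
            (by omega) (by omega) (by omega)
          rw [hpr'] at hcand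
          simp only [Bool.false_and] at hcand
          simp only [hcand.1, Bool.false_and, Bool.false_eq_true, if_false]
  -- assemble: B's final match is exactly the related A state
  unfold TSP_best_neighbor_alt
  obtain ⟨k1, k2⟩ := key
  rcases hb : ((PySem.List.pyRange 1 N 1).foldl (fun (s : Int × Option (Int × Int)) i =>
          let pr := pvPrefGo x e l C (PySem.List.pyRange 1 i 1) 0
          if !pr.2 then s
          else (PySem.List.pyRange (i + 1) (N + 1) 1).foldl (fun s j =>
            let rv := pvResGo x e l C i j (PySem.List.pyRange i (N + 1) 1) pr.1 (pvG x (i - 1))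
            if rv.2.2 then
              let cost := rv.1 + pvG (pvRow C rv.2.1) 0
              if cost < s.1 then (cost, some (i, j)) else s
            else s) s) (current_cost, none)).2 with _ | ⟨i, j⟩
  all_goals {
    rw [hb] at k1
    apply Prod.ext
    · simp only [k1, hmat]
      rw [hb]
    · simp only [k2]
      rw [hb]
  }

-- ===== VERDICT (by name: the statement is the Claim_ definition above) =====
theorem TSP_best_neighbor_spec : Claim_equal_TSP_best_neighbor := by
  intro N e l d t_matrix C x current_cost _hdom hpre
  unfold Spec_TSP_best_neighbor
  rcases hpre with h1 | ⟨hN, hxlen, hvals, _, _, _, _⟩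
  · unfold TSP_best_neighbor TSP_best_neighbor_alt
    rw [PySem.List.pyRange_one_eq_nil h1]
    simp
  · exact main_eq N e l d t_matrix C x current_cost hN hxlen hvals
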